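-- pv_equiv track=rewrite | github.com/szarroug3/Coding_Practice | advent_of_code/2025/python/src/day01/main.py | part_a
-- ===== SOURCE A (Python) =====
-- def part_a(instructions):
--     curr = 50
--     count = 0
--     for direction, steps in instructions:
--         if direction == 'L':
--             curr -= steps
--         elif direction == 'R':
--             curr += steps
--
--         curr %= 100
--
--         if not curr:
--             count += 1
--     return count
-- ===== SOURCE B (Python) =====
-- def part_a(instructions):
--     # Signed delta per instruction (+steps for 'R', -steps for 'L', 0 otherwise).
--     deltas = [steps if direction == 'R' else -steps if direction == 'L' else 0
--               for direction, steps in instructions]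
--
--     # Divide and conquer: solve(seg, start) -> (hits in seg, end position mod 100),
--     # where positions are reduced mod 100 after each delta and a hit is position 0.
--     def solve(seg, start):
--         if not seg:
--             return (0, start)
--         if len(seg) == 1:
--             p = (start + seg[0]) % 100
--             return ((1 if p == 0 else 0), p)
--         mid = len(seg) // 2
--         c1, m = solve(seg[:mid], start)
--         c2, e = solve(seg[mid:], m)
--         return (c1 + c2, e)
--
--     return solve(deltas, 50)[0]
-- ===== Notes on version B (the rewrite author's own statement) =====
-- stated objective: alternative
-- what changed: Replaces A's single fused left-to-right loop with a divide-and-conquer recursion over the list of signed deltas: each call splits the segment in half and returns (hit count, end position mod 100), combining the halves by threading the left half's end position into the right half.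
import Mathlib
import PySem

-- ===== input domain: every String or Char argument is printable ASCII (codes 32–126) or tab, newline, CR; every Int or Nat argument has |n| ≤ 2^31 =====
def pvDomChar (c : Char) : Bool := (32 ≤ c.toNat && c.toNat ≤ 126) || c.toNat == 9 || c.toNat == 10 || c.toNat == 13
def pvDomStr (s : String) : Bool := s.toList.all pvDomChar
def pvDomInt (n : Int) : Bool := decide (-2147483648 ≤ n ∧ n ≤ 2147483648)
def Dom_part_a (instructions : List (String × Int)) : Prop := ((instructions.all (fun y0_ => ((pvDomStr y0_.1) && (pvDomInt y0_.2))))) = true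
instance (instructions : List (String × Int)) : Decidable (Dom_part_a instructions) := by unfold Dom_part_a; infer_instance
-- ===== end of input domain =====

-- B replaces A's single fused left-to-right loop with a divide-and-conquer recursion over
-- the list of signed deltas, each call returning (hit count, end position mod 100).

-- ===== PORT A =====
-- A: one fold carrying (curr, count); curr is reduced mod 100 each step.
def part_a (instructions : List (String × Int)) : Int :=
  (instructions.foldl
    (fun (st : Int × Int) (p : String × Int) =>
      let curr := if p.1 == "L" then st.1 - p.2 else if p.1 == "R" then st.1 + p.2 else st.1
      let curr := PySem.Int.mod curr 100
      (curr, if curr == 0 then st.2 + 1 else st.2))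
    (50, 0)).2

-- ===== PORT B =====
-- B: signed delta of an instruction (+steps for 'R', -steps for 'L', 0 otherwise).
def pvDelta (p : String × Int) : Int :=
  if p.1 == "R" then p.2 else if p.1 == "L" then -p.2 else 0

-- B: solve(seg, start) = (hits in seg, end position mod 100), splitting seg in half.
def pvSolve : List Int → Int → Int × Int
  | [], s => (0, s)
  | [d], s =>
      let p := PySem.Int.mod (s + d) 100
      ((if p == 0 then 1 else 0), p)
  | d₁ :: d₂ :: t, s =>
      let ds := d₁ :: d₂ :: t
      let mid := ds.length / 2
      let r1 := pvSolve (ds.take mid) s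
      let r2 := pvSolve (ds.drop mid) r1.2
      (r1.1 + r2.1, r2.2)
termination_by ds _ => ds.length
decreasing_by
  · simp only [List.length_take]; simp; omega
  · simp only [List.length_drop]; simp; omega

def part_a_alt (instructions : List (String × Int)) : Int :=
  let deltas := instructions.map pvDelta
  (pvSolve deltas 50).1

-- ===== PRECONDITION & SPEC =====
def Spec_part_a (instructions : List (String × Int)) (out : Int) : Prop := out = part_a_alt instructions
instance (instructions : List (String × Int)) (out : Int) : Decidable (Spec_part_a instructions out) := by unfold Spec_part_a; infer_instance

-- ===== CLAIM (what is proved, stated in full; the proofs are below) =====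
def Claim_equal_part_a : Prop := ∀ (instructions : List (String × Int)), Dom_part_a instructions → Spec_part_a instructions (part_a instructions)

-- ===== LEMMAS AND PROOFS =====

-- sequential reference: process deltas left to right, reducing mod 100 each step
def pvSeq : List Int → Int → Int × Int
  | [], s => (0, s)
  | d :: t, s =>
      let p := PySem.Int.mod (s + d) 100
      let r := pvSeq t p
      ((if p == 0 then 1 else 0) + r.1, r.2)

theorem pvSeq_append (xs ys : List Int) (s : Int) :
    pvSeq (xs ++ ys) s
      = ((pvSeq xs s).1 + (pvSeq ys (pvSeq xs s).2).1, (pvSeq ys (pvSeq xs s).2).2) := by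
  induction xs generalizing s with
  | nil => simp [pvSeq]
  | cons d t ih => simp [pvSeq, ih, add_assoc]

theorem pvSolve_eq_pvSeq_aux (n : Nat) :
    ∀ ds : List Int, ds.length ≤ n → ∀ s : Int, pvSolve ds s = pvSeq ds s := by
  induction n with
  | zero =>
    intro ds h s
    cases ds with
    | nil => simp [pvSolve, pvSeq]
    | cons d t => simp at h
  | succ n ih =>
    intro ds h s
    match ds with
    | [] => simp [pvSolve, pvSeq]
    | [d] => simp [pvSolve, pvSeq]
    | d₁ :: d₂ :: t =>
      rw [pvSolve,
        ih _ (by simp only [List.length_take]; simp at h ⊢; omega) s,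
        ih _ (by simp only [List.length_drop]; simp at h ⊢; omega)]
      conv_rhs => rw [← List.take_append_drop ((d₁ :: d₂ :: t).length / 2) (d₁ :: d₂ :: t)]
      rw [pvSeq_append]

theorem pvSolve_eq_pvSeq (ds : List Int) (s : Int) : pvSolve ds s = pvSeq ds s :=
  pvSolve_eq_pvSeq_aux ds.length ds le_rfl s

-- A's branch pair computes st.1 + delta
theorem pvBranch (c : Int) (q : String × Int) :
    (if q.1 == "L" then c - q.2 else if q.1 == "R" then c + q.2 else c) = c + pvDelta q := by
  unfold pvDelta
  by_cases hL : q.1 == "L" <;> by_cases hR : q.1 == "R" <;> simp_all [sub_eq_add_neg]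

-- A's fold, generalized over the carried state
theorem pvA_inv (ins : List (String × Int)) (curr count : Int) :
    (ins.foldl
      (fun (st : Int × Int) (p : String × Int) =>
        let c := if p.1 == "L" then st.1 - p.2 else if p.1 == "R" then st.1 + p.2 else st.1
        let c := PySem.Int.mod c 100
        (c, if c == 0 then st.2 + 1 else st.2))
      (curr, count)).2
    = count + (pvSeq (ins.map pvDelta) curr).1 := by
  induction ins generalizing curr count with
  | nil => simp [pvSeq]
  | cons q t ih =>
    simp only [List.foldl_cons, List.map_cons, pvSeq]
    rw [pvBranch curr q, ih]
    simp only [PySem.Int.mod]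
    split_ifs <;> ring

-- ===== VERDICT (by name: the statement is the Claim_ definition above) =====
theorem part_a_spec : Claim_equal_part_a := by
  intro ins _
  unfold Spec_part_a part_a part_a_alt
  rw [pvA_inv ins 50 0]
  simp [pvSolve_eq_pvSeq]
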